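-- pv_equiv track=rewrite | github.com/devDivyank/BigData | Part - 3/Q3 - dependenciesPruning.py | prunedPowerSet
-- ===== SOURCE A (Python) =====
-- from itertools import combinations
--
-- def prunedPowerSet(columnList):
--     """
--         function that returns all combinations of columns of size 2 or less
--
--         :param columnList: a list of all columns
--     """
--     combs = []
--     n = len(columnList)
--     for i in range(0, n + 1):
--         for element in combinations(columnList, i):
--             combs.append(', '.join(element))
--     prunedSet = []
--     for s in combs[1:]:
--         if len(s.split(", ")) <= 2:
--             prunedSet.append(s)
--     return prunedSet
-- ===== SOURCE B (Python) =====
-- from itertools import combinations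
--
-- def prunedPowerSet(columnList):
--     """
--         function that returns all combinations of columns of size 2 or less
--
--         :param columnList: a list of all columns
--     """
--     combs = [", ".join(element) for size in (1, 2) for element in combinations(columnList, size)]
--     return [s for s in combs if len(s.split(", ")) <= 2]
-- ===== Notes on version B (the rewrite author's own statement) =====
-- stated objective: faster
-- what changed: B generates only the size-1 and size-2 combinations and applies the split-count pruning predicate to them, instead of enumerating the entire power set (all 2^n combinations) and then discarding everything of size > 2.
import Mathlib
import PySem

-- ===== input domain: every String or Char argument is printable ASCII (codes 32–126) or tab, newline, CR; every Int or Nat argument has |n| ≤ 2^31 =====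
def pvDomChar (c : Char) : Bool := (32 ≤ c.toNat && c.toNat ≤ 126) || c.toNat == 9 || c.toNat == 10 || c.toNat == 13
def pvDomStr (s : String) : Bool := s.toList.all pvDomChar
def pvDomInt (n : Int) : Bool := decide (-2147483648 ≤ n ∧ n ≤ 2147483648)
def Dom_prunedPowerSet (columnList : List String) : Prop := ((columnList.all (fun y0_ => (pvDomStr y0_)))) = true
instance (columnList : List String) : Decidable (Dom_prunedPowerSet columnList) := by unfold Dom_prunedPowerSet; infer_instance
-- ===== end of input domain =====

-- ===== PORT A =====
-- A enumerates the full power set before pruning; B generates only the size-1 and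
-- size-2 combinations and applies the same pruning predicate (O(n^2) vs O(2^n)).

-- the Python filter expression `len(s.split(", ")) <= 2` (used by both programs)
def pvKeep (s : String) : Bool := decide ((PySem.Chars.splitOn s.toList (String.toList ", ")).length ≤ 2)

-- itertools.combinations(xs, k) in its lexicographic-by-index order (both programs call it)
def pvCombos : Nat → List String → List (List String)
  | 0, _ => [[]]
  | _+1, [] => []
  | k+1, x :: xs => (pvCombos k xs).map (fun e => x :: e) ++ pvCombos (k+1) xs

def prunedPowerSet (columnList : List String) : List String :=
  let n : Int := columnList.length
  -- for i in range(0, n + 1): for element in combinations(columnList, i): combs.append(', '.join(element))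
  let combs : List String := List.foldl
    (fun acc i => List.foldl (fun a e => a ++ [PySem.Str.join ", " e]) acc (pvCombos i.toNat columnList))
    [] (PySem.List.pyRange 0 (n + 1))
  -- for s in combs[1:]: if len(s.split(", ")) <= 2: prunedSet.append(s)
  List.foldl (fun acc s => if pvKeep s then acc ++ [s] else acc) []
    (PySem.List.slice combs (some 1) none)

-- ===== PORT B =====
def prunedPowerSet_alt (columnList : List String) : List String :=
  -- combs = [", ".join(element) for size in (1, 2) for element in combinations(columnList, size)]
  let combs : List String :=
    List.flatMap (fun size => (pvCombos size columnList).map (PySem.Str.join ", ")) [1, 2]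
  -- return [s for s in combs if len(s.split(", ")) <= 2]
  combs.filter pvKeep

-- ===== PRECONDITION & SPEC =====
def Spec_prunedPowerSet (columnList : List String) (out : List String) : Prop := out = prunedPowerSet_alt columnList
instance (columnList : List String) (out : List String) : Decidable (Spec_prunedPowerSet columnList out) := by unfold Spec_prunedPowerSet; infer_instance

-- ===== CLAIM (what is proved, stated in full; the proofs are below) =====
def Claim_equal_prunedPowerSet : Prop := ∀ (columnList : List String), Dom_prunedPowerSet columnList → Spec_prunedPowerSet columnList (prunedPowerSet columnList)

-- ===== LEMMAS AND PROOFS =====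

-- a direct splitter for the fixed separator ", ", equal to PySem.Chars.splitOn (proved below)
def pvSp : List Char → List (List Char)
  | [] => [[]]
  | [c] => [[c]]
  | c1 :: c2 :: rest =>
    if c1 = ',' ∧ c2 = ' ' then [] :: pvSp rest
    else
      match pvSp (c2 :: rest) with
      | [] => [[c1]]
      | p :: ps => (c1 :: p) :: ps
theorem pvSp_ne_nil (l : List Char) : pvSp l ≠ [] := by
  induction l using pvSp.induct with
  | case1 => simp [pvSp]
  | case2 c => simp [pvSp]
  | case3 c1 c2 rest h ih => simp [pvSp, h]
  | case4 c1 c2 rest h ih hp =>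
    simp only [pvSp, if_neg h]; split <;> simp
  | case5 c1 c2 rest h p ps ih hp =>
    simp only [pvSp, if_neg h]; split <;> simp

theorem pvGo_eq (fuel : Nat) (l cur : List Char) (acc : List (List Char)) (hf : l.length ≤ fuel) :
    PySem.Chars.splitOn.go [',', ' '] fuel l cur acc
      = acc.reverse ++ (cur.reverse ++ (pvSp l).headI) :: (pvSp l).tail := by
  induction fuel generalizing l cur acc with
  | zero =>
    have : l = [] := by simpa using List.length_eq_zero_iff.mp (Nat.le_zero.mp hf)
    subst this
    simp [PySem.Chars.splitOn.go, pvSp]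
  | succ fuel ih =>
    match l with
    | [] => simp [PySem.Chars.splitOn.go, pvSp]
    | [c] =>
      rw [show PySem.Chars.splitOn.go [',', ' '] (fuel+1) [c] cur acc
            = PySem.Chars.splitOn.go [',', ' '] fuel [] (c :: cur) acc from by
          simp [PySem.Chars.splitOn.go, List.isPrefixOf]]
      rw [ih [] (c :: cur) acc (by simp)]
      simp [pvSp]
    | c1 :: c2 :: rest =>
      by_cases h : c1 = ',' ∧ c2 = ' '
      · obtain ⟨h1, h2⟩ := h
        subst h1; subst h2
        rw [show PySem.Chars.splitOn.go [',', ' '] (fuel+1) (','::' '::rest) cur acc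
              = PySem.Chars.splitOn.go [',', ' '] fuel rest [] (cur.reverse :: acc) from by
            simp [PySem.Chars.splitOn.go, List.isPrefixOf]]
        rw [ih rest [] (cur.reverse :: acc) (by simp at hf ⊢; omega)]
        rcases hq : pvSp rest with _ | ⟨q, qs⟩
        · exact absurd hq (pvSp_ne_nil rest)
        · simp [pvSp, hq]
      · have hnp : [',', ' '].isPrefixOf (c1::c2::rest) = false := by
          simp [List.isPrefixOf]
          intro hc hs
          exact h ⟨hc.symm, hs.symm⟩
        rw [show PySem.Chars.splitOn.go [',', ' '] (fuel+1) (c1::c2::rest) cur acc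
              = PySem.Chars.splitOn.go [',', ' '] fuel (c2::rest) (c1 :: cur) acc from by
            simp only [PySem.Chars.splitOn.go]
            rw [hnp]; rfl]
        rw [ih (c2::rest) (c1 :: cur) acc (by simp at hf ⊢; omega)]
        rcases hq : pvSp (c2 :: rest) with _ | ⟨q, qs⟩
        · exact absurd hq (pvSp_ne_nil _)
        · simp [pvSp, if_neg h, hq]

theorem splitOn_eq_pvSp (l : List Char) : PySem.Chars.splitOn l [',', ' '] = pvSp l := by
  rw [PySem.Chars.splitOn, pvGo_eq (l.length + 1) l [] [] (by omega)]
  rcases hq : pvSp l with _ | ⟨q, qs⟩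
  · exact absurd hq (pvSp_ne_nil _)
  · simp

theorem pvSp_append (x y : List Char) : pvSp (x ++ ',' :: ' ' :: y) = pvSp x ++ pvSp y := by
  induction x using pvSp.induct with
  | case1 => simp [pvSp]
  | case2 c =>
    have hc : ¬(c = ',' ∧ ',' = ' ') := by rintro ⟨rfl, h⟩; exact absurd h (by decide)
    simp only [List.cons_append, List.nil_append, pvSp, if_neg hc]
    simp
  | case3 c1 c2 rest h ih =>
    obtain ⟨rfl, rfl⟩ := h
    simp only [List.cons_append, pvSp]
    rw [ih]; rfl
  | case4 c1 c2 rest h heq ih =>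
    exact absurd heq (pvSp_ne_nil _)
  | case5 c1 c2 rest h p ps heq ih =>
    simp only [List.cons_append, pvSp, if_neg h]
    rw [show c2 :: (rest ++ ',' :: ' ' :: y) = (c2 :: rest) ++ ',' :: ' ' :: y from rfl, ih, heq]
    simp

theorem pvSp_length_pos (l : List Char) : 0 < (pvSp l).length :=
  List.length_pos_iff.mpr (pvSp_ne_nil l)

theorem pvSepToList : String.toList ", " = [',', ' '] := by decide

theorem pvKeep_eq (s : String) : pvKeep s = decide ((pvSp s.toList).length ≤ 2) := by
  rw [pvKeep, pvSepToList, splitOn_eq_pvSp]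

theorem pvJoin_toList (parts : List String) :
    (PySem.Str.join ", " parts).toList = List.intercalate [',', ' '] (parts.map String.toList) := by
  rw [PySem.Str.toList_join, PySem.Chars.join, pvSepToList]

theorem pvJoin_nil : PySem.Str.join ", " [] = "" := by decide

theorem pvJoin_single (a : String) : PySem.Str.join ", " [a] = a := by
  have h : (PySem.Str.join ", " [a]).toList = a.toList := by
    rw [pvJoin_toList]; simp [List.intercalate]
  exact String.toList_injective h

theorem pvJoin_cons_toList (a : String) (b : String) (r : List String) :
    (PySem.Str.join ", " (a :: b :: r)).toList
      = a.toList ++ ',' :: ' ' :: (PySem.Str.join ", " (b :: r)).toList := by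
  rw [pvJoin_toList, pvJoin_toList]
  simp [List.intercalate]

def pvPieces (s : String) : Nat := (pvSp s.toList).length

theorem pvPieces_pos (s : String) : 0 < pvPieces s := pvSp_length_pos _

theorem pvPieces_join_ge : ∀ (L : List String), L ≠ [] →
    L.length ≤ pvPieces (PySem.Str.join ", " L) := by
  intro L
  induction L with
  | nil => intro h; exact absurd rfl h
  | cons a r ih =>
    intro _
    cases r with
    | nil => simpa [pvJoin_single] using pvPieces_pos a
    | cons b r' =>
      have hrec := ih (by simp)
      have : pvPieces (PySem.Str.join ", " (a :: b :: r')) = pvPieces a + pvPieces (PySem.Str.join ", " (b :: r')) := by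
        unfold pvPieces
        rw [pvJoin_cons_toList, pvSp_append, List.length_append]
      rw [this]
      have := pvPieces_pos a
      simp only [List.length_cons] at hrec ⊢
      omega

theorem pvCombos_gt : ∀ (cl : List String) (k : Nat), cl.length < k → pvCombos k cl = [] := by
  intro cl
  induction cl with
  | nil => intro k hk; cases k with | zero => omega | succ k => rfl
  | cons x xs ih =>
    intro k hk
    cases k with
    | zero => omega
    | succ k =>
      simp only [pvCombos]
      rw [ih k (by simpa using hk), ih (k+1) (by simp at hk ⊢; omega)]
      simp

theorem pvCombos_mem_length : ∀ (cl : List String) (k : Nat) (L : List String),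
    L ∈ pvCombos k cl → L.length = k := by
  intro cl
  induction cl with
  | nil =>
    intro k L hL
    cases k with
    | zero => simp [pvCombos] at hL; simp [hL]
    | succ k => simp [pvCombos] at hL
  | cons x xs ih =>
    intro k L hL
    cases k with
    | zero => simp [pvCombos] at hL; simp [hL]
    | succ k =>
      simp only [pvCombos, List.mem_append, List.mem_map] at hL
      rcases hL with ⟨e, he, rfl⟩ | hL
      · simp [ih k e he]
      · exact ih (k+1) L hL

theorem pvFilter3 (cl : List String) (k : Nat) (hk : 3 ≤ k) :
    ((pvCombos k cl).map (PySem.Str.join ", ")).filter pvKeep = [] := by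
  rw [List.filter_eq_nil_iff]
  intro s hs
  simp only [List.mem_map] at hs
  rcases hs with ⟨L, hL, rfl⟩
  have hlen := pvCombos_mem_length cl k L hL
  have hne : L ≠ [] := by
    intro h; rw [h] at hlen; simp at hlen; omega
  have hge := pvPieces_join_ge L hne
  rw [pvKeep_eq]
  simp only [decide_eq_true_eq, not_le]
  unfold pvPieces at hge
  omega

theorem pvFlat3 (cl : List String) : ∀ (ks : List Nat), (∀ k ∈ ks, 3 ≤ k) →
    (List.flatMap (fun k => (pvCombos k cl).map (PySem.Str.join ", ")) ks).filter pvKeep = [] := by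
  intro ks
  induction ks with
  | nil => intro _; rfl
  | cons k ks ih =>
    intro h
    rw [List.flatMap_cons, List.filter_append, pvFilter3 cl k (h k (by simp)),
      ih (fun j hj => h j (by simp [hj]))]
    rfl

theorem pvTailFilter (cl : List String) :
    (List.flatMap (fun k => (pvCombos k cl).map (PySem.Str.join ", "))
        (List.map Nat.succ (List.range cl.length))).filter pvKeep
      = ((pvCombos 1 cl).map (PySem.Str.join ", ")).filter pvKeep
        ++ ((pvCombos 2 cl).map (PySem.Str.join ", ")).filter pvKeep := by
  rcases hm : cl.length with _ | m
  · rw [pvCombos_gt cl 1 (by omega), pvCombos_gt cl 2 (by omega)]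
    simp
  · rw [List.range_succ_eq_map, List.map_cons, List.flatMap_cons, List.filter_append]
    congr 1
    rcases m with _ | m'
    · rw [pvCombos_gt cl 2 (by omega)]
      simp
    · rw [List.range_succ_eq_map, List.map_cons, List.map_cons, List.flatMap_cons, List.filter_append]
      rw [pvFlat3 cl _ (by intro k hk; simp at hk; omega)]
      simp

theorem prunedPowerSet_eq (cl : List String) : prunedPowerSet cl = prunedPowerSet_alt cl := by
  unfold prunedPowerSet prunedPowerSet_alt
  simp only [PySem.List.foldl_append_singleton_eq_map, PySem.List.foldl_append_eq_flatMap,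
    List.nil_append]
  rw [show ((cl.length : Int) + 1) = ((cl.length + 1 : Nat) : Int) from by push_cast; ring]
  rw [PySem.List.pyRange_zero_natCast]
  rw [List.flatMap_map]
  rw [PySem.List.slice_from _ (by norm_num : (0:Int) ≤ 1)]
  simp only [Int.toNat_natCast, Int.toNat_one]
  rw [List.range_succ_eq_map, List.flatMap_cons]
  rw [PySem.List.foldl_append_if pvKeep (fun s => s)]
  simp only [List.nil_append]
  rw [show (pvCombos 0 cl).map (PySem.Str.join ", ") = [""] from by simp [pvCombos, pvJoin_nil]]
  simp only [List.map_id']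
  rw [List.singleton_append, List.drop_succ_cons, List.drop_zero]
  rw [pvTailFilter]
  simp [List.flatMap_cons, List.filter_append]

-- ===== VERDICT (by name: the statement is the Claim_ definition above) =====
theorem prunedPowerSet_spec : Claim_equal_prunedPowerSet := by
  intro columnList _
  unfold Spec_prunedPowerSet
  exact prunedPowerSet_eq columnList
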